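-- pv_equiv track=rewrite | github.com/mitchdzugan/cvmelee | CVMelee/PlayerState.py | matchToPercent
-- ===== SOURCE A (Python) =====
-- def matchToPercent(match, threshold):
-- 	percent = None
-- 	for j in range(3):
-- 		if match[j]["Match"] > threshold:
-- 			if percent == None:
-- 				percent = 0
-- 			percent += match[j]["Digit"] * 10**j
-- 		else:
-- 			break
-- 	return percent
-- ===== SOURCE B (Python) =====
-- def matchToPercent(match, threshold):
--     def go(j):
--         if j == 3 or match[j]["Match"] <= threshold:
--             return None
--         rest = go(j + 1)
--         return match[j]["Digit"] + 10 * (0 if rest is None else rest)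
--     return go(0)
-- ===== Notes on version B (the rewrite author's own statement) =====
-- stated objective: alternative
-- what changed: B is a recursive Horner evaluation: it recurses forward over positions and builds the number back-to-front as digit + 10*rest, with no powers of 10, no Optional accumulator and no break loop.
import Mathlib
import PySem

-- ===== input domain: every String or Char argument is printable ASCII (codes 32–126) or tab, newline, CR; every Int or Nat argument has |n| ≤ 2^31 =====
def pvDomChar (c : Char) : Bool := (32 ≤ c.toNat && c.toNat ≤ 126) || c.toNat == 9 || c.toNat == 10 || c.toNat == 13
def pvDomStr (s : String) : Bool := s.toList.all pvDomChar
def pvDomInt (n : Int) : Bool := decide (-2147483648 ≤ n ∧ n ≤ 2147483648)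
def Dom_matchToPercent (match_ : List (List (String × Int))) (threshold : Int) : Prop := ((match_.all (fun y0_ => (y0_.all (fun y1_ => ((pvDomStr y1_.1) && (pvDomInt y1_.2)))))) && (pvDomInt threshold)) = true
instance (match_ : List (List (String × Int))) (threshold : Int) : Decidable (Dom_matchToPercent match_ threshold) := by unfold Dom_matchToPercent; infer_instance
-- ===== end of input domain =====

-- B replaces A's forward accumulate-with-break loop by a recursive Horner evaluation (digit + 10*rest, back-to-front); alternative decomposition, same cost.


-- dict lookup (first match) shared by both ports; total via a default (Pre_ excludes the KeyError/IndexError inputs)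
def pvLook? (d : List (String × Int)) (k : String) : Option Int :=
  (d.find? (fun p => p.1 == k)).map (·.2)
def pvLookD (d : List (String × Int)) (k : String) : Int :=
  (pvLook? d k).getD 0
def pvEntry (match_ : List (List (String × Int))) (j : Nat) : List (String × Int) :=
  (PySem.List.pyGet? match_ (j : Int)).getD []

-- ===== PORT A =====
-- for j in range(3): accumulate into the Optional percent, break on first failure
def aGo (match_ : List (List (String × Int))) (threshold : Int) :
    List Nat → Option Int → Option Int
  | [], percent => percent
  | j :: rest, percent =>
    if pvLookD (pvEntry match_ j) "Match" > threshold then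
      aGo match_ threshold rest
        (some ((percent.getD 0) + pvLookD (pvEntry match_ j) "Digit" * (10 : Int) ^ j))
    else percent

def matchToPercent (match_ : List (List (String × Int))) (threshold : Int) : Option Int :=
  aGo match_ threshold [0, 1, 2] none

-- ===== PORT B =====
-- recursive go(j): None at j == 3 or a failed match, else digit + 10 * (rest or 0)
def bGo (match_ : List (List (String × Int))) (threshold : Int) (j : Nat) : Option Int :=
  if h : j < 3 then
    if pvLookD (pvEntry match_ j) "Match" ≤ threshold then none
    else
      let rest := bGo match_ threshold (j + 1)
      some (pvLookD (pvEntry match_ j) "Digit" + 10 * (rest.getD 0))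
  else none
termination_by 3 - j

def matchToPercent_alt (match_ : List (List (String × Int))) (threshold : Int) : Option Int :=
  bGo match_ threshold 0

-- ===== PRECONDITION & SPEC =====
-- Pre_ excludes exactly the inputs where Python A raises: whenever positions before j all matched
-- (entry exists, "Match" > threshold, "Digit" present), position j itself must exist with a "Match"
-- key, and must carry a "Digit" key if its "Match" exceeds the threshold.
def pvOk (match_ : List (List (String × Int))) (j : Nat) : Prop :=
  j < match_.length ∧ (pvLook? (pvEntry match_ j) "Match").isSome
def pvMatched (match_ : List (List (String × Int))) (threshold : Int) (j : Nat) : Prop :=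
  pvOk match_ j ∧ pvLookD (pvEntry match_ j) "Match" > threshold ∧
    (pvLook? (pvEntry match_ j) "Digit").isSome
def Pre_matchToPercent (match_ : List (List (String × Int))) (threshold : Int) : Prop :=
  ∀ j < 3, (∀ i < j, pvMatched match_ threshold i) →
    (pvOk match_ j ∧ (pvLookD (pvEntry match_ j) "Match" > threshold →
      (pvLook? (pvEntry match_ j) "Digit").isSome))
instance (match_ : List (List (String × Int))) (threshold : Int) : Decidable (Pre_matchToPercent match_ threshold) := by
  unfold Pre_matchToPercent pvMatched pvOk; infer_instance
def pvWitness_matchToPercent : (List (List (String × Int))) × Int :=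
  ([[("Match", 5), ("Digit", 7)], [("Match", 0), ("Digit", 2)]], 1)

def Spec_matchToPercent (match_ : List (List (String × Int))) (threshold : Int) (out : Option Int) : Prop := out = matchToPercent_alt match_ threshold
instance (match_ : List (List (String × Int))) (threshold : Int) (out : Option Int) : Decidable (Spec_matchToPercent match_ threshold out) := by unfold Spec_matchToPercent; infer_instance

-- ===== CLAIM (what is proved, stated in full; the proofs are below) =====
def Claim_equal_matchToPercent : Prop := ∀ (match_ : List (List (String × Int))) (threshold : Int), Dom_matchToPercent match_ threshold → Pre_matchToPercent match_ threshold → Spec_matchToPercent match_ threshold (matchToPercent match_ threshold)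

-- ===== LEMMAS AND PROOFS =====
theorem ports_eq (match_ : List (List (String × Int))) (threshold : Int) :
    matchToPercent match_ threshold = matchToPercent_alt match_ threshold := by
  unfold matchToPercent matchToPercent_alt
  simp only [aGo]
  unfold bGo; norm_num
  unfold bGo; norm_num
  unfold bGo; norm_num
  unfold bGo; norm_num
  split_ifs <;> first | rfl | omega | (simp_all; try ring)

-- ===== VERDICT (by name: the statement is the Claim_ definition above) =====
theorem matchToPercent_spec : Claim_equal_matchToPercent := by
  intro match_ threshold _ _
  exact ports_eq match_ threshold
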